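-- pv_equiv track=rewrite | github.com/juglab/CellPaintMONO | cellpaintmono/preprocessing.py | filter_features
-- ===== SOURCE A (Python) =====
-- from typing import List, Optional
--
-- def filter_features(
--     feature_list: List[str], exclude_keywords: Optional[List[str]] = None
-- ) -> List[str]:
--     """
--     Remove features containing any of the exclusion keywords.
--     Default excludes: ExecutionTime, ModuleError, Height, Width, Scaling, Group, ZBF, Brightfield
--     """
--     if exclude_keywords is None:
--         exclude_keywords = [
--             "ExecutionTime",
--             "ModuleError",
--             "Height",
--             "Width",
--             "Scaling",
--             "Group",
--             "ZBF",
--             "Brightfield",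
--         ]
--
--     return [
--         f
--         for f in feature_list
--         if not any(keyword.lower() in f.lower() for keyword in exclude_keywords)
--     ]
-- ===== SOURCE B (Python) =====
-- from typing import List, Optional
--
-- def filter_features(
--     feature_list: List[str], exclude_keywords: Optional[List[str]] = None
-- ) -> List[str]:
--     if exclude_keywords is None:
--         exclude_keywords = [
--             "ExecutionTime",
--             "ModuleError",
--             "Height",
--             "Width",
--             "Scaling",
--             "Group",
--             "ZBF",
--             "Brightfield",
--         ]
--     # keep (original, lowered) pairs; peel off one keyword at a time
--     kept = [(f, f.lower()) for f in feature_list]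
--     for kw in exclude_keywords:
--         k = kw.lower()
--         kept = [p for p in kept if k not in p[1]]
--     return [p[0] for p in kept]
-- ===== Notes on version B (the rewrite author's own statement) =====
-- stated objective: alternative
-- what changed: Swapped the loop nesting: instead of testing every keyword per feature inside one comprehension, B lowercases each feature once, then iterates over the keywords, successively filtering the surviving (feature, lowered) pairs, and finally projects the originals.
import Mathlib
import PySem

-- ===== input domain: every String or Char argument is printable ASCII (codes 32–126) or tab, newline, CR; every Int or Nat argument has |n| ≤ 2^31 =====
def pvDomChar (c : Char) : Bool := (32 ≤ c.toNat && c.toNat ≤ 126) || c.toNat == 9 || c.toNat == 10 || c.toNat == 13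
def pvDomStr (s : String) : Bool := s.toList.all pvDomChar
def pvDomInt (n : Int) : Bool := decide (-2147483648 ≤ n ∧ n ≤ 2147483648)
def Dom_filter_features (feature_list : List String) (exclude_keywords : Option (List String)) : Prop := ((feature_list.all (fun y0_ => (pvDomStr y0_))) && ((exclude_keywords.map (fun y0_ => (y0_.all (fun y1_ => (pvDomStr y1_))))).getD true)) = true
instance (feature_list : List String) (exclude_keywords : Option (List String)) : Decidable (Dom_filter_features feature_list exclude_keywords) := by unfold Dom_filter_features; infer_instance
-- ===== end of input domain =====

-- B swaps the loop nesting: features are lowered once, then keywords are applied one at a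
-- time as successive filters over the surviving (feature, lowered) pairs (alternative).


-- default exclusion keywords (the literal list both Pythons write out)
def pvDefaultExcludes : List String :=
  ["ExecutionTime", "ModuleError", "Height", "Width", "Scaling", "Group", "ZBF", "Brightfield"]

-- ===== PORT A =====
def filter_features (feature_list : List String) (exclude_keywords : Option (List String)) : List String :=
  let ks := exclude_keywords.getD pvDefaultExcludes
  feature_list.filter (fun f =>
    !(ks.any (fun keyword => PySem.Str.isIn (PySem.Str.lower keyword) (PySem.Str.lower f))))

-- ===== PORT B =====
def filter_features_alt (feature_list : List String) (exclude_keywords : Option (List String)) : List String :=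
  let ks := exclude_keywords.getD pvDefaultExcludes
  let kept0 := feature_list.map (fun f => (f, PySem.Str.lower f))
  let kept := ks.foldl (fun acc kw =>
      let k := PySem.Str.lower kw
      acc.filter (fun p => !(PySem.Str.isIn k p.2))) kept0
  kept.map Prod.fst

-- ===== PRECONDITION & SPEC =====
def Spec_filter_features (feature_list : List String) (exclude_keywords : Option (List String)) (out : List String) : Prop := out = filter_features_alt feature_list exclude_keywords
instance (feature_list : List String) (exclude_keywords : Option (List String)) (out : List String) : Decidable (Spec_filter_features feature_list exclude_keywords out) := by unfold Spec_filter_features; infer_instance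

-- ===== CLAIM (what is proved, stated in full; the proofs are below) =====
def Claim_equal_filter_features : Prop := ∀ (feature_list : List String) (exclude_keywords : Option (List String)), Dom_filter_features feature_list exclude_keywords → Spec_filter_features feature_list exclude_keywords (filter_features feature_list exclude_keywords)

-- ===== LEMMAS AND PROOFS =====

-- B's keyword-by-keyword filtering of a pair list equals one filter by the disjunction.
theorem pv_foldl_filter_eq (ks : List String) (ps : List (String × String)) :
    ks.foldl (fun acc kw =>
        let k := PySem.Str.lower kw
        acc.filter (fun p => !(PySem.Str.isIn k p.2))) ps
      = ps.filter (fun p => !(ks.any (fun k => PySem.Str.isIn (PySem.Str.lower k) p.2))) := by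
  induction ks generalizing ps with
  | nil => simp
  | cons k ks ih =>
    simp only [List.foldl_cons, ih, List.filter_filter, List.any_cons]
    congr 1
    funext p
    cases PySem.Str.isIn (PySem.Str.lower k) p.2 <;> simp

-- projecting fst after filtering a (f, lower f) pair list filters the originals
theorem pv_map_fst_filter (q : String → Bool) (fl : List String) :
    (((fl.map (fun f => (f, PySem.Str.lower f))).filter (fun p => q p.2)).map Prod.fst)
      = fl.filter (fun f => q (PySem.Str.lower f)) := by
  induction fl with
  | nil => rfl
  | cons f fl ih =>
    simp only [List.map_cons, List.filter_cons]
    split <;> simp_all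

theorem filter_features_spec : Claim_equal_filter_features := by
  intro fl ek _
  show filter_features fl ek = filter_features_alt fl ek
  simp only [filter_features, filter_features_alt, pv_foldl_filter_eq,
    pv_map_fst_filter (fun s => !((ek.getD pvDefaultExcludes).any
      (fun k => PySem.Str.isIn (PySem.Str.lower k) s)))]
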